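-- pv_equiv track=rewrite | github.com/sejinkim0101/leetcode_practice | 0443-string-compression/0443-string-compression.py | compress
-- ===== SOURCE A (Python) =====
-- from typing import List
--
-- def compress(chars: List[str]) -> int:
--     write = read = 0
--     n = len(chars)
--
--     while read < n:
--         currentChar = chars[read]
--         count = 0
--
--         # Count consecutive repeating characters
--         while read < n and chars[read] == currentChar:
--             read += 1
--             count += 1
--
--         # Write the character
--         chars[write] = currentChar
--         write += 1
--
--         # Write the count if greater than 1
--         if count > 1:
--             for digit in str(count):
--                 chars[write] = digit
--                 write += 1
--
--     return write
-- ===== SOURCE B (Python) =====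
-- from typing import List
--
-- def compress(chars: List[str]) -> int:
--     # Pass 1: materialize the runs as (char, count) pairs.
--     runs = []
--     for ch in chars:
--         if runs and runs[-1][0] == ch:
--             runs[-1] = (ch, runs[-1][1] + 1)
--         else:
--             runs.append((ch, 1))
--     # Pass 2: build the compressed form, then write it back over the front.
--     result = []
--     for c, k in runs:
--         result.append(c)
--         if k > 1:
--             result.extend(str(k))
--     chars[:len(result)] = result
--     return len(result)
-- ===== Notes on version B (the rewrite author's own statement) =====
-- stated objective: alternative
-- what changed: Replaces A's interleaved read/write index loops (count a run, immediately write char and digits in place) with a two-phase decomposition: one pass materializes (char, count) run pairs, a second builds the compressed list and writes it back over the front in bulk.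
import Mathlib
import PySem

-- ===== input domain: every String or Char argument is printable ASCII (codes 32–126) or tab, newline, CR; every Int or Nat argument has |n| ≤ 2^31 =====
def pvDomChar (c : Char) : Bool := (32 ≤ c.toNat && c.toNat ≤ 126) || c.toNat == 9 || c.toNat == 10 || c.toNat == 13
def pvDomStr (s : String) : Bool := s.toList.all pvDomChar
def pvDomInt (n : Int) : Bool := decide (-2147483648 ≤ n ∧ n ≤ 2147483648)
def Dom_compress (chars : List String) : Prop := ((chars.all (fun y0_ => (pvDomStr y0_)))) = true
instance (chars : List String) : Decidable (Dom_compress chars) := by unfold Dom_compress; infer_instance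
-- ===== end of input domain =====

-- B two-pass run-length compression (materialize runs, then write back) instead of A's interleaved
-- read/write index loops; equivalence is about the RETURN value (both mutate `chars` identically in Python).

-- ===== PORT A =====
-- inner `while read < n and chars[read] == currentChar` counting loop (run length from `read`,
-- excluding the element already named currentChar)
def runLenA (c : String) : List String → Nat
  | [] => 0
  | x :: xs => if x == c then runLenA c xs + 1 else 0

-- outer `while read < n` loop over the unread suffix, carrying `write`
def compressLoopA (write : Int) : List String → Int
  | [] => write
  | x :: xs =>
    let count : Int := 1 + (runLenA x xs : Int)
    let w := write + 1
    let w := if count > 1 then (PySem.Int.toStr count).toList.foldl (fun a _ => a + 1) w else w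
    compressLoopA w (xs.drop (runLenA x xs))
  termination_by l => l.length
  decreasing_by simp

def compress (chars : List String) : Int := compressLoopA 0 chars

-- ===== PORT B =====
-- pass 1 loop body (runs kept in reverse order: `runs[-1]` is the head)
def stepRunB (acc : List (String × Int)) (ch : String) : List (String × Int) :=
  match acc with
  | (c, k) :: rest => if c == ch then (c, k + 1) :: rest else (ch, (1 : Int)) :: acc
  | [] => [(ch, (1 : Int))]

-- pass 2 loop body: append the char, then the digits of the count when > 1
def stepResB (res : List String) (ck : String × Int) : List String :=
  (res ++ [ck.1]) ++ (if ck.2 > 1 then (PySem.Int.toStr ck.2).toList.map (fun d => String.ofList [d]) else [])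

def compress_alt (chars : List String) : Int :=
  let runs := (chars.foldl stepRunB []).reverse
  let result := runs.foldl stepResB []
  (result.length : Int)

-- ===== PRECONDITION & SPEC =====
def Spec_compress (chars : List String) (out : Int) : Prop := out = compress_alt chars
instance (chars : List String) (out : Int) : Decidable (Spec_compress chars out) := by unfold Spec_compress; infer_instance

-- ===== CLAIM (what is proved, stated in full; the proofs are below) =====
def Claim_equal_compress : Prop := ∀ (chars : List String), Dom_compress chars → Spec_compress chars (compress chars)

-- ===== LEMMAS AND PROOFS =====

-- the run decomposition both programs follow
def runsSpec : List String → List (String × Int)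
  | [] => []
  | x :: xs => (x, 1 + (runLenA x xs : Int)) :: runsSpec (xs.drop (runLenA x xs))
  termination_by l => l.length
  decreasing_by simp

-- weight a run contributes to the output length
def runWeight (ck : String × Int) : Int :=
  1 + (if ck.2 > 1 then ((PySem.Int.toStr ck.2).toList.length : Int) else 0)

theorem foldl_add_one (L : List Char) (a : Int) :
    L.foldl (fun a _ => a + 1) a = a + L.length := by
  induction L generalizing a with
  | nil => simp
  | cons x xs ih => simp [List.foldl, ih]; omega

theorem loopA_eq (l : List String) (w : Int) :
    compressLoopA w l = w + ((runsSpec l).map runWeight).sum := by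
  match l with
  | [] => simp [compressLoopA.eq_def, runsSpec.eq_def]
  | x :: xs =>
    rw [compressLoopA.eq_def, runsSpec.eq_def]
    have := loopA_eq (xs.drop (runLenA x xs)) -- recursive call
    simp only [runWeight, List.map_cons, List.sum_cons]
    split_ifs with h
    · rw [foldl_add_one, this]; ring
    · rw [this]; ring
  termination_by l.length
  decreasing_by simp

theorem stepRunB_absorb (l : List String) (c : String) (k : Int) (r : List (String × Int)) :
    l.foldl stepRunB ((c, k) :: r) =
      (l.drop (runLenA c l)).foldl stepRunB ((c, k + (runLenA c l : Int)) :: r) := by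
  induction l generalizing k with
  | nil => simp [runLenA]
  | cons x xs ih =>
    by_cases h : x == c
    · have hc : c == x := by simpa [BEq.comm] using h
      simp only [List.foldl, stepRunB, hc, if_pos, runLenA, h, if_pos]
      rw [ih]
      have : k + 1 + (runLenA c xs : Int) = k + ((runLenA c xs + 1 : Nat) : Int) := by push_cast; ring
      simp [List.drop_succ_cons, this]
    · simp [runLenA, h]

theorem drop_runLenA_head (l : List String) (c : String) :
    ∀ y ys, l.drop (runLenA c l) = y :: ys → (y == c) = false := by
  induction l with
  | nil => intro y ys h; simp at h
  | cons x xs ih =>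
    intro y ys h
    by_cases hx : x == c
    · rw [runLenA, if_pos hx, List.drop_succ_cons] at h; exact ih y ys h
    · rw [runLenA, if_neg hx] at h
      simp only [List.drop_zero] at h
      cases h; simpa using hx

theorem foldl_runs (l : List String) (acc : List (String × Int))
    (hok : ∀ c k r, acc = (c, k) :: r → ∀ y ys, l = y :: ys → (y == c) = false) :
    (l.foldl stepRunB acc).reverse = acc.reverse ++ runsSpec l := by
  match l with
  | [] => simp [runsSpec.eq_def]
  | x :: xs =>
    have hstep : (x :: xs).foldl stepRunB acc = xs.foldl stepRunB ((x, (1 : Int)) :: acc) := by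
      cases acc with
      | nil => simp [List.foldl, stepRunB]
      | cons p r =>
        obtain ⟨c, k⟩ := p
        have := hok c k r rfl x xs rfl
        have hc : (c == x) = false := by simpa [BEq.comm] using this
        simp [List.foldl, stepRunB, hc]
    rw [hstep, stepRunB_absorb]
    rw [foldl_runs (xs.drop (runLenA x xs)) _ ?_]
    · conv_rhs => rw [runsSpec.eq_def]
      simp [List.append_assoc]
    · intro c k r hacc y ys hl
      cases hacc
      exact drop_runLenA_head xs x y ys hl
  termination_by l.length
  decreasing_by simp

theorem runs_eq (l : List String) : (l.foldl stepRunB []).reverse = runsSpec l := by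
  have := foldl_runs l [] (by intro c k r h; simp at h)
  simpa using this

theorem resLen_eq (rs : List (String × Int)) (res : List String) :
    (((rs.foldl stepResB res).length : Nat) : Int) = res.length + (rs.map runWeight).sum := by
  induction rs generalizing res with
  | nil => simp
  | cons p ps ih =>
    rw [List.foldl, ih]
    simp only [stepResB, runWeight, List.length_append, List.map_cons, List.sum_cons]
    split_ifs with h <;> (simp; omega)

-- ===== VERDICT (by name: the statement is the Claim_ definition above) =====
theorem compress_spec : Claim_equal_compress := by
  intro chars _
  unfold Spec_compress compress compress_alt
  rw [loopA_eq, runs_eq, resLen_eq]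
  simp
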